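-- pv_equiv track=rewrite | github.com/KimYongGyu/study- | 스크립트프로그래밍/6.8/11_35.py | mycityallloc
-- ===== SOURCE A (Python) =====
-- def mycityallloc(l,citynum):
--     list2=[]
--     for j in range(0,citynum*citynum,citynum):
--         locsum=0
--         for i in range(j,j+citynum):
--             locsum+=l[i]
--         list2.append(locsum)
--     return list2
-- ===== SOURCE B (Python) =====
-- def mycityallloc(l, citynum):
--     prefix = [0]
--     s = 0
--     for x in l:
--         s += x
--         prefix.append(s)
--     return [prefix[(k + 1) * citynum] - prefix[k * citynum] for k in range(citynum)]
-- ===== Notes on version B (the rewrite author's own statement) =====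
-- stated objective: alternative
-- what changed: B precomputes a running prefix-sum array in one pass over l and reads each block sum as a difference of two prefix values, eliminating A's inner per-block summation loop.
import Mathlib
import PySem

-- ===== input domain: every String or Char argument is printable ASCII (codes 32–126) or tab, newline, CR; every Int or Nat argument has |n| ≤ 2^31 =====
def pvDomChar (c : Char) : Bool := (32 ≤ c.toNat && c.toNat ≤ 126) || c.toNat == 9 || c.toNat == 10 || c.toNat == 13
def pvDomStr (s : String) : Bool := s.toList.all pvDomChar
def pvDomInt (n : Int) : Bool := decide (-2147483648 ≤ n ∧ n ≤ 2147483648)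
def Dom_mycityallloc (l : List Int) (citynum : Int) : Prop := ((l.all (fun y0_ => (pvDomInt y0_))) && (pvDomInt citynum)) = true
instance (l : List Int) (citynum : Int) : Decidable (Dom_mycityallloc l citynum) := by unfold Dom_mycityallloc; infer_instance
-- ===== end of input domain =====

-- B replaces A's nested block/element loops with a one-pass prefix-sum array; each
-- block sum is then a difference of two prefix values (alternative algorithm; no speed claim).

-- ===== PORT A =====
def mycityallloc (l : List Int) (citynum : Int) : List Int :=
  (PySem.List.pyRange 0 (citynum * citynum) citynum).foldl
    (fun list2 j =>
      list2 ++ [(PySem.List.pyRange j (j + citynum) 1).foldl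
        (fun locsum i => locsum + PySem.List.pyGetD l i 0) 0])
    []

-- ===== PORT B =====
-- Source B's first loop: prefix = [0]; s = 0; for x in l: s += x; prefix.append(s)
def pvPrefix (l : List Int) : List Int × Int :=
  l.foldl (fun acc x => (acc.1 ++ [acc.2 + x], acc.2 + x)) ([0], 0)

def mycityallloc_alt (l : List Int) (citynum : Int) : List Int :=
  (PySem.List.pyRange 0 citynum 1).map (fun k =>
    PySem.List.pyGetD (pvPrefix l).1 ((k + 1) * citynum) 0
      - PySem.List.pyGetD (pvPrefix l).1 (k * citynum) 0)

-- ===== PRECONDITION & SPEC =====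
-- Pre_ excludes exactly the inputs where A raises: citynum = 0 (range step 0 → ValueError)
-- and citynum > 0 with len(l) < citynum² (l[i] → IndexError)
def Pre_mycityallloc (l : List Int) (citynum : Int) : Prop :=
  citynum ≠ 0 ∧ (citynum < 0 ∨ citynum * citynum ≤ (l.length : Int))
instance (l : List Int) (citynum : Int) : Decidable (Pre_mycityallloc l citynum) := by
  unfold Pre_mycityallloc; infer_instance

def pvWitness_mycityallloc : List Int × Int := ([1, 2, 3, 4], 2)

def Spec_mycityallloc (l : List Int) (citynum : Int) (out : List Int) : Prop :=
  out = mycityallloc_alt l citynum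
instance (l : List Int) (citynum : Int) (out : List Int) : Decidable (Spec_mycityallloc l citynum out) := by
  unfold Spec_mycityallloc; infer_instance

-- ===== CLAIM (what is proved, stated in full; the proofs are below) =====
def Claim_equal_mycityallloc : Prop := ∀ (l : List Int) (citynum : Int), Dom_mycityallloc l citynum → Pre_mycityallloc l citynum → Spec_mycityallloc l citynum (mycityallloc l citynum)

-- ===== LEMMAS AND PROOFS =====

-- the sum of one block of size c starting at position p
def pvSsum (l : List Int) (c : Int) (p : Int) : Int :=
  (PySem.List.slice l (some p) (some (p + c))).sum

-- A's inner loop is the sum of the corresponding slice (all indices in range)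
lemma pv_inner_sum (l : List Int) (j c : Int) (h0 : 0 ≤ j) (hc : 0 ≤ c)
    (hlen : j + c ≤ (l.length : Int)) :
    (PySem.List.pyRange j (j + c) 1).foldl (fun locsum i => locsum + PySem.List.pyGetD l i 0) 0
      = pvSsum l c j := by
  rw [PySem.List.foldl_add]
  have hsplit :
      PySem.List.pyRange j (l.length : Int) 1
        = PySem.List.pyRange j (j + c) 1 ++ PySem.List.pyRange (j + c) (l.length : Int) 1 :=
    PySem.List.pyRange_one_append j (j + c) _ (by omega) (by omega)
  have hfull :
      (PySem.List.pyRange j (l.length : Int) 1).map (fun i => PySem.List.pyGetD l i 0)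
        = l.drop j.toNat := PySem.List.map_pyGetD_pyRange' l 0 h0
  rw [hsplit, List.map_append] at hfull
  have hlenX : ((PySem.List.pyRange j (j + c) 1).map (fun i => PySem.List.pyGetD l i 0)).length
      = c.toNat := by
    simp [PySem.List.length_pyRange_one]
  have htake : (PySem.List.pyRange j (j + c) 1).map (fun i => PySem.List.pyGetD l i 0)
      = (l.drop j.toNat).take c.toNat := by
    rw [← hfull, ← hlenX, List.take_left]
  obtain ⟨jn, rfl⟩ : ∃ jn : Nat, j = (jn : Int) := ⟨j.toNat, by omega⟩
  obtain ⟨cn, rfl⟩ : ∃ cn : Nat, c = (cn : Int) := ⟨c.toNat, by omega⟩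
  have hslice : pvSsum l (cn : Int) (jn : Int) = ((l.drop jn).take cn).sum := by
    unfold pvSsum
    rw [PySem.List.slice_natCast_add]
  rw [htake, hslice]
  simp

-- A, characterised for citynum > 0 with enough elements
lemma pv_a_eq (l : List Int) (c : Int) (hc : 0 < c) (hlen : c * c ≤ (l.length : Int)) :
    mycityallloc l c = (List.range c.toNat).map (fun (k : Nat) => pvSsum l c (c * (k : Int))) := by
  unfold mycityallloc
  rw [PySem.List.pyRange_of_pos 0 (c * c) hc]
  have hcount : (if (0 : Int) < c * c then ((c * c - 0 + c - 1) / c).toNat else 0) = c.toNat := by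
    rw [if_pos (by positivity)]
    have h1 : c * c - 0 + c - 1 = (c - 1) + c * c := by ring
    rw [h1, Int.add_mul_ediv_left _ _ (by omega : c ≠ 0),
        Int.ediv_eq_zero_of_lt (by omega) (by omega)]
    simp
  rw [hcount, PySem.List.foldl_append_singleton_eq_map, List.nil_append, List.map_map]
  apply List.map_congr_left
  intro k hk
  simp only [Function.comp]
  have hk' : (k : Int) < c := by
    rw [List.mem_range] at hk
    omega
  have h0 : (0 : Int) ≤ 0 + c * (k : Int) := by positivity
  have hup : (0 + c * (k : Int)) + c ≤ (l.length : Int) := by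
    have : c * ((k : Int) + 1) ≤ c * c := by
      apply mul_le_mul_of_nonneg_left (by omega) (by omega)
    nlinarith
  rw [pv_inner_sum l (0 + c * (k : Int)) c h0 (by omega) hup]
  congr 1
  ring

-- the prefix array is the list of take-sums of l, and the accumulator is l.sum
lemma pvPrefix_eq (l : List Int) :
    pvPrefix l = ((List.range (l.length + 1)).map (fun i => (l.take i).sum), l.sum) := by
  induction l using List.reverseRecOn with
  | nil => simp [pvPrefix]
  | append_singleton l x ih =>
      unfold pvPrefix at ih ⊢
      rw [List.foldl_append, ih]
      simp only [List.foldl_cons, List.foldl_nil, List.length_append, List.length_singleton]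
      rw [Prod.mk.injEq]
      refine ⟨?_, ?_⟩
      · conv_rhs => rw [show l.length + 1 + 1 = (l.length + 1) + 1 from rfl, List.range_succ,
          List.map_append]
        congr 1
        · apply List.map_congr_left
          intro i hi
          rw [List.mem_range] at hi
          rw [List.take_append_of_le_length (by omega)]
        · simp
      · simp

-- reading the prefix array at a natural index n ≤ len gives sum of the first n elements
lemma pvPrefix_getD (l : List Int) (n : Nat) (hn : n ≤ l.length) :
    PySem.List.pyGetD (pvPrefix l).1 ((n : Nat) : Int) 0 = (l.take n).sum := by
  rw [pvPrefix_eq]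
  simp only [PySem.List.pyGetD_natCast]
  rw [List.getD_eq_getElem _ _ (by simp; omega)]
  simp

-- B, characterised for citynum > 0 with enough elements
lemma pv_b_eq (l : List Int) (c : Int) (hc : 0 < c) (hlen : c * c ≤ (l.length : Int)) :
    mycityallloc_alt l c = (List.range c.toNat).map (fun (k : Nat) => pvSsum l c (c * (k : Int))) := by
  unfold mycityallloc_alt
  rw [PySem.List.pyRange_one]
  simp only [sub_zero, List.map_map]
  apply List.map_congr_left
  intro k hk
  rw [List.mem_range] at hk
  simp only [Function.comp]
  obtain ⟨cn, rfl⟩ : ∃ cn : Nat, c = (cn : Int) := ⟨c.toNat, by omega⟩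
  have hcn : 0 < cn := by exact_mod_cast hc
  have hlen' : cn * cn ≤ l.length := by exact_mod_cast hlen
  have h1 : (0 + (k : Int) + 1) * (cn : Int) = (((k + 1) * cn : Nat) : Int) := by push_cast; ring
  have h2 : (0 + (k : Int)) * (cn : Int) = ((k * cn : Nat) : Int) := by push_cast; ring
  rw [h1, h2, pvPrefix_getD l ((k + 1) * cn) (le_trans (Nat.mul_le_mul_right _ (by omega)) hlen'),
      pvPrefix_getD l (k * cn) (le_trans (Nat.mul_le_mul_right _ (by omega)) hlen')]
  have h3 : (cn : Int) * (k : Int) = ((k * cn : Nat) : Int) := by push_cast; ring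
  unfold pvSsum
  rw [h3, PySem.List.slice_natCast_add]
  have h4 : (k + 1) * cn = k * cn + cn := by ring
  rw [h4, List.take_add, List.sum_append]
  ring

-- A = [] for negative citynum
lemma pv_a_neg (l : List Int) (c : Int) (hc : c < 0) : mycityallloc l c = [] := by
  unfold mycityallloc
  have h : PySem.List.pyRange 0 (c * c) c = [] := by
    unfold PySem.List.pyRange
    rw [if_neg (by omega), if_neg (by omega), if_neg (by nlinarith)]
    simp
  rw [h]; rfl

-- B = [] for negative citynum (range(citynum) is empty)
lemma pv_b_neg (l : List Int) (c : Int) (hc : c < 0) : mycityallloc_alt l c = [] := by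
  unfold mycityallloc_alt
  rw [PySem.List.pyRange_one_eq_nil (by omega)]
  rfl

theorem pv_main (l : List Int) (c : Int) (hpre : Pre_mycityallloc l c) :
    mycityallloc l c = mycityallloc_alt l c := by
  obtain ⟨hne, hcase⟩ := hpre
  rcases lt_or_gt_of_ne hne with hneg | hpos
  · rw [pv_a_neg l c hneg, pv_b_neg l c hneg]
  · have hlen : c * c ≤ (l.length : Int) := by
      rcases hcase with h | h
      · omega
      · exact h
    rw [pv_a_eq l c hpos hlen, pv_b_eq l c hpos hlen]

-- ===== VERDICT (by name: the statement is the Claim_ definition above) =====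
theorem mycityallloc_spec : Claim_equal_mycityallloc := by
  intro l c _ hpre
  unfold Spec_mycityallloc
  exact pv_main l c hpre
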